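-- pv_equiv track=rewrite | github.com/R3dPnd/pnd-leet-code | explore/array/two-d-traversal.py | traverse_2d_array
-- ===== SOURCE A (Python) =====
-- def traverse_2d_array(arr, direction='row'):
--     """
--     Traverse a 2D array either by rows or by columns.
--
--     Args:
--         arr (list): 2D array to traverse
--         direction (str): 'row' for row-wise traversal, 'col' for column-wise traversal
--
--     Returns:
--         list: Traversed elements in the specified order
--     """
--     if not arr or not arr[0]:
--         return []
--
--     rows, cols = len(arr), len(arr[0])
--     result = []
--
--     if direction.lower() == 'row':
--         # Traverse row by row
--         for i in range(rows):
--             for j in range(cols):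
--                 result.append(arr[i][j])
--     elif direction.lower() == 'col':
--         # Traverse column by column
--         for j in range(cols):
--             for i in range(rows):
--                 result.append(arr[i][j])
--     else:
--         raise ValueError("Direction must be 'row' or 'col'")
--
--     return result
-- ===== SOURCE B (Python) =====
-- def traverse_2d_array(arr, direction='row'):
--     if not arr or not arr[0]:
--         return []
--     rows, cols = len(arr), len(arr[0])
--     d = direction.lower()
--     if d == 'row':
--         return [arr[k // cols][k % cols] for k in range(rows * cols)]
--     if d == 'col':
--         return [arr[k % rows][k // rows] for k in range(rows * cols)]
--     raise ValueError("Direction must be 'row' or 'col'")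
-- ===== Notes on version B (the rewrite author's own statement) =====
-- stated objective: alternative
-- what changed: Replaced the two nested index loops with a single flat loop over range(rows*cols) that recovers (i,j) by divmod, building each result as one comprehension.
import Mathlib
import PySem

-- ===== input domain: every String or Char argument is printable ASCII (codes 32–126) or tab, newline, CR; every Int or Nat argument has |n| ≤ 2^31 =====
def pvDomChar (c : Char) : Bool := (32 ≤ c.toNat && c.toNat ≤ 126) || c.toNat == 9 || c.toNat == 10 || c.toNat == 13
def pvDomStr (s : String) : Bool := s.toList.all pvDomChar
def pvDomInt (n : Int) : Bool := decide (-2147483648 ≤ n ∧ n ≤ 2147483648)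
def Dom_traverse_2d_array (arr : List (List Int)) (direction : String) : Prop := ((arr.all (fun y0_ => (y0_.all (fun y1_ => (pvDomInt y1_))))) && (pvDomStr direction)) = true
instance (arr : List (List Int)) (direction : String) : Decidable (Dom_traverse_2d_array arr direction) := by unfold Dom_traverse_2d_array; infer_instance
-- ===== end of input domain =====

-- B flattens A's two nested index loops into one loop over range(rows*cols) recovering (i,j) by divmod (alternative decomposition, same cost).


-- ===== PORT A =====
-- literal transliteration of A: empty guard, then nested for-loops appending arr[i][j];
-- where Python raises (bad direction: ValueError; short row: IndexError via arr[i][j]) Pre_ excludes the input,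
-- and pyGetD's default is never reached inside Pre_.
def traverse_2d_array (arr : List (List Int)) (direction : String) : List Int :=
  if arr = [] ∨ arr.headD [] = [] then []
  else
    let rows : Int := arr.length
    let cols : Int := (arr.headD []).length
    if PySem.Str.lower direction = "row" then
      (PySem.List.pyRange 0 rows 1).foldl (fun result i =>
        (PySem.List.pyRange 0 cols 1).foldl (fun result j =>
          result ++ [PySem.List.pyGetD (PySem.List.pyGetD arr i []) j 0]) result) []
    else if PySem.Str.lower direction = "col" then
      (PySem.List.pyRange 0 cols 1).foldl (fun result j =>
        (PySem.List.pyRange 0 rows 1).foldl (fun result i =>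
          result ++ [PySem.List.pyGetD (PySem.List.pyGetD arr i []) j 0]) result) []
    else []  -- Python A raises ValueError here; excluded by Pre_

-- ===== PORT B =====
-- literal transliteration of B: one comprehension over range(rows*cols) with divmod-style index recovery.
def traverse_2d_array_alt (arr : List (List Int)) (direction : String) : List Int :=
  if arr = [] ∨ arr.headD [] = [] then []
  else
    let rows : Int := arr.length
    let cols : Int := (arr.headD []).length
    let d := PySem.Str.lower direction
    if d = "row" then
      (PySem.List.pyRange 0 (rows * cols) 1).map (fun k =>
        PySem.List.pyGetD (PySem.List.pyGetD arr (PySem.Int.floordiv k cols) []) (PySem.Int.mod k cols) 0)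
    else if d = "col" then
      (PySem.List.pyRange 0 (rows * cols) 1).map (fun k =>
        PySem.List.pyGetD (PySem.List.pyGetD arr (PySem.Int.mod k rows) []) (PySem.Int.floordiv k rows) 0)
    else []  -- Python B raises ValueError here; excluded by Pre_

-- ===== PRECONDITION & SPEC =====
-- Pre_ excludes exactly the inputs where A raises: a non-'row'/'col' direction on a nonempty grid (ValueError)
-- and ragged grids whose some row is shorter than the first row (IndexError).
def Pre_traverse_2d_array (arr : List (List Int)) (direction : String) : Prop :=
  arr = [] ∨ arr.headD [] = [] ∨
    ((PySem.Str.lower direction = "row" ∨ PySem.Str.lower direction = "col") ∧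
      ∀ r ∈ arr, (arr.headD []).length ≤ r.length)
instance (arr : List (List Int)) (direction : String) : Decidable (Pre_traverse_2d_array arr direction) := by
  unfold Pre_traverse_2d_array; infer_instance

def pvWitness_traverse_2d_array : List (List Int) × String := ([[1, 2, 3], [4, 5, 6]], "col")

def Spec_traverse_2d_array (arr : List (List Int)) (direction : String) (out : List Int) : Prop := out = traverse_2d_array_alt arr direction
instance (arr : List (List Int)) (direction : String) (out : List Int) : Decidable (Spec_traverse_2d_array arr direction out) := by unfold Spec_traverse_2d_array; infer_instance

-- ===== CLAIM (what is proved, stated in full; the proofs are below) =====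
def Claim_equal_traverse_2d_array : Prop := ∀ (arr : List (List Int)) (direction : String), Dom_traverse_2d_array arr direction → Pre_traverse_2d_array arr direction → Spec_traverse_2d_array arr direction (traverse_2d_array arr direction)

-- ===== LEMMAS AND PROOFS =====

-- divmod flattening: one pass over range (r*c) with (k/c, k%c) is the nested row-major traversal
theorem range_mul_divmod {β : Type} (g : Nat → Nat → β) (r c : Nat) :
    (List.range (r * c)).map (fun k => g (k / c) (k % c)) =
      (List.range r).flatMap (fun i => (List.range c).map (fun j => g i j)) := by
  induction r with
  | zero => simp
  | succ n ih =>
    rw [Nat.succ_mul, List.range_add, List.map_append, List.range_succ, List.flatMap_append, ih]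
    congr 1
    simp only [List.flatMap_cons, List.flatMap_nil, List.append_nil, List.map_map,
      Function.comp_def]
    apply List.map_congr_left
    intro j hj
    have hj' : j < c := List.mem_range.mp hj
    have h1 : (n * c + j) / c = n := by
      rw [Nat.add_comm, Nat.add_mul_div_right _ _ (by omega : 0 < c), Nat.div_eq_of_lt hj']; omega
    have h2 : (n * c + j) % c = j := by
      rw [Nat.add_comm, Nat.add_mul_mod_self_right, Nat.mod_eq_of_lt hj']
    rw [h1, h2]

-- A's nested append-loop is the flatMap of inner maps
theorem nested_foldl_eq_flatMap {α β γ : Type} (f : α → β → γ) (l1 : List α) (l2 : List β) :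
    l1.foldl (fun acc i => l2.foldl (fun acc' j => acc' ++ [f i j]) acc) ([] : List γ) =
      l1.flatMap (fun i => l2.map (f i)) := by
  have hfun : (fun (acc : List γ) i => l2.foldl (fun acc' j => acc' ++ [f i j]) acc)
      = fun acc i => acc ++ l2.map (f i) := by
    funext acc i; exact PySem.List.foldl_append_singleton_eq_map _ _ _
  rw [hfun, PySem.List.foldl_append_eq_flatMap, List.nil_append]

theorem traverse_2d_array_spec : Claim_equal_traverse_2d_array := by
  intro arr direction _ hpre
  unfold Spec_traverse_2d_array traverse_2d_array traverse_2d_array_alt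
  by_cases hguard : arr = [] ∨ arr.headD [] = []
  · rw [if_pos hguard, if_pos hguard]
  · rw [if_neg hguard, if_neg hguard]
    rcases hpre with h | h | ⟨hdir, _⟩
    · exact absurd (Or.inl h) hguard
    · exact absurd (Or.inr h) hguard
    · set r := arr.length with hr
      set c := (arr.headD []).length with hc
      rcases hdir with h | h
      · rw [if_pos h, if_pos h]
        have hcast : (r : Int) * (c : Int) = ((r * c : Nat) : Int) := by push_cast; ring
        rw [hcast, PySem.List.pyRange_zero_natCast, PySem.List.pyRange_zero_natCast,
            PySem.List.pyRange_zero_natCast]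
        rw [List.foldl_map]
        simp only [List.foldl_map, List.map_map, Function.comp_def,
          PySem.Int.floordiv_natCast, PySem.Int.mod_natCast]
        refine Eq.trans ?_ (range_mul_divmod
          (fun i j => PySem.List.pyGetD (PySem.List.pyGetD arr (i : Int) []) (j : Int) 0) r c).symm
        exact nested_foldl_eq_flatMap
          (fun (i j : Nat) => PySem.List.pyGetD (PySem.List.pyGetD arr (i : Int) []) (j : Int) 0)
          (List.range r) (List.range c)
      · have hne : PySem.Str.lower direction ≠ "row" := by rw [h]; decide
        rw [if_neg hne, if_pos h, if_neg hne, if_pos h]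
        have hcast : (r : Int) * (c : Int) = ((c * r : Nat) : Int) := by push_cast; ring
        rw [hcast, PySem.List.pyRange_zero_natCast, PySem.List.pyRange_zero_natCast,
            PySem.List.pyRange_zero_natCast]
        rw [List.foldl_map]
        simp only [List.foldl_map, List.map_map, Function.comp_def,
          PySem.Int.floordiv_natCast, PySem.Int.mod_natCast]
        refine Eq.trans ?_ (range_mul_divmod
          (fun j i => PySem.List.pyGetD (PySem.List.pyGetD arr (i : Int) []) (j : Int) 0) c r).symm
        exact nested_foldl_eq_flatMap
          (fun (j i : Nat) => PySem.List.pyGetD (PySem.List.pyGetD arr (i : Int) []) (j : Int) 0)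
          (List.range c) (List.range r)
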